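-- pv_equiv track=rewrite | github.com/gchazot/aoc | year_2018/day_05.py | polymer_reduce
-- ===== SOURCE A (Python) =====
-- def is_opposite_case(letter1, letter2):
--     return abs(ord(letter1) - ord(letter2)) == ord("a") - ord("A")
--
-- def polymer_reduce(polymer, ignores=""):
--     poly_list = [char for char in polymer]
--     current = 0
--     while current < len(poly_list):
--         if poly_list[current] in ignores:
--             del poly_list[current]
--             current = max(0, current - 1)
--         elif current >= len(poly_list) - 1:
--             break
--         elif is_opposite_case(poly_list[current], poly_list[current + 1]):
--             del poly_list[current:current+2]
--             current = max(0, current - 1)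
--         else:
--             current += 1
--     return "".join(poly_list)
-- ===== SOURCE B (Python) =====
-- def polymer_reduce(polymer, ignores=""):
--     stack = []
--     for c in polymer:
--         if stack and abs(ord(stack[-1]) - ord(c)) == ord("a") - ord("A"):
--             stack.pop()
--         elif c in ignores:
--             pass
--         else:
--             stack.append(c)
--     return "".join(stack)
-- ===== Notes on version B (the rewrite author's own statement) =====
-- stated objective: faster
-- what changed: Replaced A's quadratic index-scan with in-place deletions and backtracking by a single left-to-right pass that keeps a stack, popping the top when the incoming unit is its opposite-case partner (reaction checked before the incoming char's ignore test, exactly as A does).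
import Mathlib
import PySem

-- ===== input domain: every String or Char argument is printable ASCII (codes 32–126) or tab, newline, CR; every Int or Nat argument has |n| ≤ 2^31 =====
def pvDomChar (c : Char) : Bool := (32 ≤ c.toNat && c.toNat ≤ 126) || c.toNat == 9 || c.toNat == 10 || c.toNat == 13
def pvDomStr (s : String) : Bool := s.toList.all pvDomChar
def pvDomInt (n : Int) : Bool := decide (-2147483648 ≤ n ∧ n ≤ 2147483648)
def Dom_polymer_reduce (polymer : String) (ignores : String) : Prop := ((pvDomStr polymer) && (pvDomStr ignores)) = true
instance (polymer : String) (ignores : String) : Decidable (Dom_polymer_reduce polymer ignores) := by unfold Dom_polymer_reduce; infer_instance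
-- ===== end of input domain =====

-- B replaces A's quadratic delete-and-backtrack scan by a single-pass stack (one fold, pop on an opposite-case top); a timing run must confirm any speed label.

-- ===== PORT A =====
def is_opposite_case (letter1 letter2 : Char) : Bool :=
  ((letter1.toNat : Int) - (letter2.toNat : Int)).natAbs == 32

-- A's while loop: index `current` over the list, deletions via take/drop.
-- `fuel` only makes the recursion structural; `polymer_reduce` supplies enough fuel
-- (2*len+1 bounds the loop's iteration count), so the 0-fuel branch is never reached.
def polyLoopA (ig : List Char) : Nat → List Char → Nat → List Char
  | 0, l, _ => l
  | fuel + 1, l, cur =>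
    if h : cur < l.length then
      if l[cur] ∈ ig then
        polyLoopA ig fuel (l.take cur ++ l.drop (cur + 1)) (cur - 1)
      else if h2 : cur + 1 < l.length then
        if is_opposite_case l[cur] l[cur + 1] then
          polyLoopA ig fuel (l.take cur ++ l.drop (cur + 2)) (cur - 1)
        else
          polyLoopA ig fuel l (cur + 1)
      else l   -- current >= len(poly_list) - 1: break
    else l

def polymer_reduce (polymer : String) (ignores : String) : String :=
  String.ofList (polyLoopA ignores.toList (2 * polymer.toList.length + 1) polymer.toList 0)

-- ===== PORT B =====
def stepB (ig : List Char) (stack : List Char) (c : Char) : List Char :=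
  match stack with
  | t :: ts => if is_opposite_case t c then ts
               else if c ∈ ig then stack else c :: stack
  | [] => if c ∈ ig then [] else [c]

def polymer_reduce_alt (polymer : String) (ignores : String) : String :=
  String.ofList (List.reverse (polymer.toList.foldl (stepB ignores.toList) []))

-- ===== PRECONDITION & SPEC =====
def Spec_polymer_reduce (polymer : String) (ignores : String) (out : String) : Prop := out = polymer_reduce_alt polymer ignores
instance (polymer : String) (ignores : String) (out : String) : Decidable (Spec_polymer_reduce polymer ignores out) := by unfold Spec_polymer_reduce; infer_instance

-- ===== CLAIM (what is proved, stated in full; the proofs are below) =====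
def Claim_equal_polymer_reduce : Prop := ∀ (polymer : String) (ignores : String), Dom_polymer_reduce polymer ignores → Spec_polymer_reduce polymer ignores (polymer_reduce polymer ignores)

-- ===== LEMMAS AND PROOFS =====

-- Loop invariant: with the already-reduced prefix `stack.reverse` in front of the
-- unprocessed `rest`, A's loop at index `stack.length` computes the fold of B's step
-- over `rest` from `stack`, provided the stack is ignore-free, has no adjacent
-- opposite-case pair, and its top does not react with the head of `rest`.
theorem polyLoopA_eq_fold (ig : List Char) (fuel : Nat) (rest stack : List Char)
    (hfuel : 2 * rest.length + stack.length < fuel)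
    (hig : ∀ c ∈ stack, c ∉ ig)
    (hchain : List.IsChain (fun a b => is_opposite_case b a = false) stack)
    (hbd : ∀ t ts c rs, stack = t :: ts → rest = c :: rs → is_opposite_case t c = false) :
    polyLoopA ig fuel (stack.reverse ++ rest) stack.length
      = (List.foldl (stepB ig) stack rest).reverse := by
  induction fuel generalizing rest stack with
  | zero => omega
  | succ fuel IH =>
  match rest with
  | [] =>
    rw [polyLoopA]
    simp [List.foldl]
  | c :: rs =>
    have hlen : stack.length < (stack.reverse ++ (c :: rs)).length := by simp
    have hget : (stack.reverse ++ (c :: rs))[stack.length]'hlen = c := by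
      rw [List.getElem_append_right (by simp)]
      simp
    have htake : (stack.reverse ++ (c :: rs)).take stack.length = stack.reverse := by
      rw [List.take_append_of_le_length (by simp)]
      simp
    have hdrop1 : (stack.reverse ++ (c :: rs)).drop (stack.length + 1) = rs := by
      rw [show stack.length + 1 = stack.reverse.length + 1 by simp,
        List.drop_append]
      simp
    have hdrop2 : (stack.reverse ++ (c :: rs)).drop (stack.length + 2) = rs.drop 1 := by
      rw [show stack.length + 2 = stack.reverse.length + 2 by simp,
        List.drop_append]
      simp
    rw [polyLoopA]
    simp only [hlen, dif_pos, hget, htake, hdrop1, hdrop2]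
    by_cases hcig : c ∈ ig
    · -- ignored char: A deletes it; B's fold skips it
      simp only [hcig, if_pos]
      match stack, hig, hchain with
      | [], _, _ =>
        have := IH rs []
          (by simp only [List.length_cons, List.length_nil] at hfuel ⊢; omega)
          (by simp) (by simp) (by intro t ts c' rs' h; simp at h)
        simpa [stepB, hcig] using this
      | t :: ts, hig, hchain =>
        have hts : ∀ x ∈ ts, x ∉ ig := fun x hx => hig x (List.mem_cons_of_mem _ hx)
        have hchain' : List.IsChain (fun a b => is_opposite_case b a = false) ts :=
          hchain.tail
        have hbd' : ∀ u us c' rs', ts = u :: us → t :: rs = c' :: rs' →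
            is_opposite_case u c' = false := by
          intro u us c' rs' h1 h2
          cases h2
          exact (h1 ▸ hchain).rel
        have := IH (t :: rs) ts
          (by simp only [List.length_cons] at hfuel ⊢; omega)
          hts hchain' hbd'
        simp only [List.length_cons, Nat.add_sub_cancel] at this ⊢
        rw [show ((t :: ts).reverse ++ rs) = ts.reverse ++ t :: rs by simp, this]
        -- both folds reduce to foldl from (t :: ts) over rs
        have hstep1 : stepB ig ts t = t :: ts := by
          have htig : t ∉ ig := hig t (List.mem_cons_self)
          match ts, hchain with
          | [], _ => simp [stepB, htig]
          | u :: us, hchain =>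
            have : is_opposite_case u t = false := hchain.rel
            simp [stepB, this, htig]
        have hstep2 : stepB ig (t :: ts) c = t :: ts := by
          have : is_opposite_case t c = false := hbd t ts c rs rfl rfl
          simp [stepB, this, hcig]
        simp [List.foldl, hstep1, hstep2]
    · -- c not ignored
      simp only [hcig, if_false]
      match rs with
      | [] =>
        -- last element: A breaks; B pushes c
        have : ¬ stack.length + 1 < (stack.reverse ++ [c]).length := by simp
        simp only [this]
        have hpush : stepB ig stack c = c :: stack := by
          match stack with
          | [] => simp [stepB, hcig]
          | t :: ts =>
            have : is_opposite_case t c = false := hbd t ts c [] rfl rfl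
            simp [stepB, this, hcig]
        simp [List.foldl, hpush]
      | d :: ds =>
        have h2 : stack.length + 1 < (stack.reverse ++ c :: d :: ds).length := by
          simp
        simp only [h2, dif_pos]
        have hget2 : (stack.reverse ++ c :: d :: ds)[stack.length + 1]'h2 = d := by
          rw [List.getElem_append_right (by simp)]
          simp
        rw [hget2]
        have hpush : stepB ig stack c = c :: stack := by
          match stack with
          | [] => simp [stepB, hcig]
          | t :: ts =>
            have : is_opposite_case t c = false := hbd t ts c (d :: ds) rfl rfl
            simp [stepB, this, hcig]
        by_cases hopp : is_opposite_case c d = true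
        · -- reaction: A deletes the pair; B pushes c then pops it on d
          simp only [hopp, if_pos, List.drop_succ_cons, List.drop_zero]
          have hpop : stepB ig (c :: stack) d = stack := by
            simp [stepB, hopp]
          have hfold : List.foldl (stepB ig) stack (c :: d :: ds)
              = List.foldl (stepB ig) stack ds := by
            rw [List.foldl_cons, List.foldl_cons, hpush, hpop]
          rw [hfold]
          match stack, hig, hchain with
          | [], _, _ =>
            have := IH ds []
              (by simp only [List.length_cons, List.length_nil] at hfuel ⊢; omega)
              (by simp) (by simp) (by intro t ts c' rs' h; simp at h)
            simpa using this
          | t :: ts, hig, hchain =>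
            have hts : ∀ x ∈ ts, x ∉ ig := fun x hx => hig x (List.mem_cons_of_mem _ hx)
            have hbd' : ∀ u us c' rs', ts = u :: us → t :: ds = c' :: rs' →
                is_opposite_case u c' = false := by
              intro u us c' rs' h1 h2
              cases h2
              exact (h1 ▸ hchain).rel
            have := IH (t :: ds) ts
              (by simp only [List.length_cons] at hfuel ⊢; omega)
              hts hchain.tail hbd'
            simp only [List.length_cons, Nat.add_sub_cancel] at this ⊢
            rw [show ((t :: ts).reverse ++ ds) = ts.reverse ++ t :: ds by simp, this]
            have hstep1 : stepB ig ts t = t :: ts := by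
              have htig : t ∉ ig := hig t (List.mem_cons_self)
              match ts, hchain with
              | [], _ => simp [stepB, htig]
              | u :: us, hchain =>
                have : is_opposite_case u t = false := hchain.rel
                simp [stepB, this, htig]
            simp [List.foldl, hstep1]
        · -- no reaction: A advances; B pushes c
          have hopp' : is_opposite_case c d = false := by
            cases h : is_opposite_case c d
            · rfl
            · exact absurd h hopp
          simp only [hopp', if_neg, Bool.false_eq_true, not_false_iff]
          have hig' : ∀ x ∈ c :: stack, x ∉ ig := by
            intro x hx
            rcases List.mem_cons.mp hx with h | h
            · subst h; exact hcig
            · exact hig x h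
          have hchain' : List.IsChain (fun a b => is_opposite_case b a = false)
              (c :: stack) := by
            match stack, hchain with
            | [], _ => simp
            | t :: ts, hchain =>
              exact List.isChain_cons_cons.mpr ⟨hbd t ts c (d :: ds) rfl rfl, hchain⟩
          have hbd' : ∀ u us c' rs', c :: stack = u :: us → d :: ds = c' :: rs' →
              is_opposite_case u c' = false := by
            intro u us c' rs' h1 h2
            cases h1; cases h2
            exact hopp'
          have := IH (d :: ds) (c :: stack)
            (by simp only [List.length_cons] at hfuel ⊢; omega) hig' hchain' hbd'
          simp only [List.length_cons] at this ⊢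
          rw [show stack.reverse ++ c :: d :: ds = (c :: stack).reverse ++ d :: ds
            by simp, show stack.length + 1 = (c :: stack).length by simp] at *
          rw [this]
          simp [List.foldl, hpush]

-- ===== VERDICT (by name: the statement is the Claim_ definition above) =====
theorem polymer_reduce_spec : Claim_equal_polymer_reduce := by
  intro polymer ignores _
  unfold Spec_polymer_reduce polymer_reduce polymer_reduce_alt
  have := polyLoopA_eq_fold ignores.toList (2 * polymer.toList.length + 1)
    polymer.toList [] (by simp) (by simp) (by simp)
    (by intro t ts c rs h; simp at h)
  simp only [List.reverse_nil, List.nil_append, List.length_nil] at this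
  rw [this]
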